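-- pv_equiv track=rewrite | github.com/Tor12378/Flash2022 | .github/workflows/blank.py | spisok_2
-- ===== SOURCE A (Python) =====
-- def spisok_2(x1):
--     kol1=0
--     kol2=0
--     for number in [17,19,29]:
--         if x1%number==0:
--             kol1=1
--     for number in [31,37,41]:
--         if x1 % number == 0:
--             kol2 = 1
--     if (kol1==1 and kol2==0) or (kol2==1 and kol1==0):
--         return True
--     else:
--         return False
-- ===== SOURCE B (Python) =====
-- def _hits(x1, prod):
--     # gcd(x1, prod) > 1  <=>  x1 shares a prime factor with prod
--     a, b = prod, x1 % prod
--     while b: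
--         a, b = b, a % b
--     return a > 1
--
-- def spisok_2(x1):
--     # 9367 = 17*19*29, 47027 = 31*37*41; divisible by a set member iff gcd with product > 1
--     return _hits(x1, 9367) != _hits(x1, 47027)
-- ===== Notes on version B (the rewrite author's own statement) =====
-- stated objective: alternative
-- what changed: Replaces the two membership loops over the prime lists by a Euclidean-gcd test of x1 against each set's precomputed product (9367 and 47027), XORing whether each gcd is nontrivial.
import Mathlib
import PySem

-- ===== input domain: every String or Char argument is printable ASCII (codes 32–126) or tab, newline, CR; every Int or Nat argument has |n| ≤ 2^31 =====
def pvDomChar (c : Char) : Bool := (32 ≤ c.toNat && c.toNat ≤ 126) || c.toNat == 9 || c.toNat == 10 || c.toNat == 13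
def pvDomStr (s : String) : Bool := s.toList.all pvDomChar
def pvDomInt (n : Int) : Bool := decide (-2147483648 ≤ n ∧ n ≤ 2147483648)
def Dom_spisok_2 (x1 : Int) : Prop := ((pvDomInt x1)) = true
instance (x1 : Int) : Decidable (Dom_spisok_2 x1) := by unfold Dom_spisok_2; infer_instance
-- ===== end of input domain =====

-- B replaces the two membership loops over the prime lists by a Euclidean gcd test against each set's product (9367 = 17*19*29, 47027 = 31*37*41), XORed; alternative algorithm, same cost.

-- ===== PORT A =====
def spisok_2 (x1 : Int) : Bool :=
  let kol1 : Int := [17, 19, 29].foldl (fun k number => if PySem.Int.mod x1 number == 0 then 1 else k) 0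
  let kol2 : Int := [31, 37, 41].foldl (fun k number => if PySem.Int.mod x1 number == 0 then 1 else k) 0
  if (kol1 == 1 && kol2 == 0) || (kol2 == 1 && kol1 == 0) then true else false

-- ===== PORT B =====
-- termination lemma for the Euclidean loop (cited by decreasing_by)
theorem pv_mod_natAbs_lt (a b : Int) (h : b ≠ 0) : (PySem.Int.mod a b).natAbs < b.natAbs := by
  rcases lt_or_gt_of_ne h with hb | hb
  · have := PySem.Int.mod_neg_bounds a (b := b) hb
    omega
  · have h1 := PySem.Int.mod_nonneg a hb
    have h2 := PySem.Int.mod_lt a hb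
    omega

-- the `while b: a, b = b, a % b` loop of Source B's _hits
def gcdLoop (a b : Int) : Int :=
  if _h : b = 0 then a else gcdLoop b (PySem.Int.mod a b)
termination_by b.natAbs
decreasing_by exact pv_mod_natAbs_lt a b _h

-- Source B's _hits
def hits (x1 prod : Int) : Bool := gcdLoop prod (PySem.Int.mod x1 prod) > 1

def spisok_2_alt (x1 : Int) : Bool := hits x1 9367 != hits x1 47027

-- ===== PRECONDITION & SPEC =====
def Spec_spisok_2 (x1 : Int) (out : Bool) : Prop := out = spisok_2_alt x1
instance (x1 : Int) (out : Bool) : Decidable (Spec_spisok_2 x1 out) := by unfold Spec_spisok_2; infer_instance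

-- ===== CLAIM (what is proved, stated in full; the proofs are below) =====
def Claim_equal_spisok_2 : Prop := ∀ (x1 : Int), Dom_spisok_2 x1 → Spec_spisok_2 x1 (spisok_2 x1)

-- ===== LEMMAS AND PROOFS =====

-- one Euclidean step preserves the gcd (Python % is Int.fmod)
theorem gcd_mod_right (a b : Int) : Int.gcd b (PySem.Int.mod a b) = Int.gcd a b := by
  show Int.gcd b (Int.fmod a b) = _
  rw [Int.fmod_def, mul_comm, Int.gcd_comm a b]
  exact Int.gcd_sub_mul_right_right b a (a.fdiv b)

theorem gcdLoop_eq_gcd (a b : Int) (ha : 0 ≤ a) (hb : 0 ≤ b) :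
    gcdLoop a b = (Int.gcd a b : Int) := by
  by_cases h : b = 0
  · subst h; rw [gcdLoop]; simp [Int.gcd, Int.natAbs_of_nonneg ha]
  · have hbpos : 0 < b := lt_of_le_of_ne hb (Ne.symm h)
    rw [gcdLoop]; simp only [h, dite_false]
    rw [gcdLoop_eq_gcd b (PySem.Int.mod a b) hb (PySem.Int.mod_nonneg a hbpos),
        gcd_mod_right]
termination_by b.natAbs
decreasing_by exact pv_mod_natAbs_lt a b h

theorem hits_eq (x1 p : Int) (hp : 0 < p) : hits x1 p = decide (1 < Int.gcd x1 p) := by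
  unfold hits
  rw [gcdLoop_eq_gcd p (PySem.Int.mod x1 p) (le_of_lt hp) (PySem.Int.mod_nonneg x1 hp),
      gcd_mod_right, Int.gcd_comm]
  simp only [decide_eq_decide]
  omega

theorem nat_gcd_prod3 (n p q r : Nat) (hp : Nat.Prime p) (hq : Nat.Prime q) (hr : Nat.Prime r) :
    1 < Nat.gcd n (p * q * r) ↔ (p ∣ n ∨ q ∣ n ∨ r ∣ n) := by
  have h1 : Nat.Coprime n (p * q * r) ↔ (¬ p ∣ n ∧ ¬ q ∣ n ∧ ¬ r ∣ n) := by
    rw [Nat.coprime_mul_iff_right, Nat.coprime_mul_iff_right, Nat.coprime_comm,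
        hp.coprime_iff_not_dvd, Nat.coprime_comm, hq.coprime_iff_not_dvd,
        Nat.coprime_comm, hr.coprime_iff_not_dvd]
    tauto
  have hpos : 0 < Nat.gcd n (p * q * r) :=
    Nat.gcd_pos_of_pos_right _ (Nat.mul_pos (Nat.mul_pos hp.pos hq.pos) hr.pos)
  unfold Nat.Coprime at h1
  constructor
  · intro hg
    by_contra hc
    push Not at hc
    have := h1.mpr ⟨hc.1, hc.2.1, hc.2.2⟩
    omega
  · intro hd
    rcases Nat.lt_or_ge 1 (Nat.gcd n (p * q * r)) with h | h
    · exact h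
    · exfalso
      have hg : Nat.gcd n (p * q * r) = 1 := by omega
      rcases h1.mp hg with ⟨a, b, c⟩
      tauto

theorem dvd_natAbs_iff (x : Int) (n : Nat) : ((n : Int) ∣ x) ↔ n ∣ x.natAbs := by
  rw [← Int.natAbs_dvd_natAbs]; simp

theorem gcd_9367 (x : Int) :
    (1 < Int.gcd x 9367) ↔ ((17:Int) ∣ x ∨ (19:Int) ∣ x ∨ (29:Int) ∣ x) := by
  have h : (9367 : Int) = ((17 * 19 * 29 : Nat) : Int) := by norm_num
  rw [h, Int.gcd, Int.natAbs_natCast,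
      nat_gcd_prod3 _ 17 19 29 (by norm_num) (by norm_num) (by norm_num),
      ← dvd_natAbs_iff, ← dvd_natAbs_iff, ← dvd_natAbs_iff]
  norm_num

theorem gcd_47027 (x : Int) :
    (1 < Int.gcd x 47027) ↔ ((31:Int) ∣ x ∨ (37:Int) ∣ x ∨ (41:Int) ∣ x) := by
  have h : (47027 : Int) = ((31 * 37 * 41 : Nat) : Int) := by norm_num
  rw [h, Int.gcd, Int.natAbs_natCast,
      nat_gcd_prod3 _ 31 37 41 (by norm_num) (by norm_num) (by norm_num),
      ← dvd_natAbs_iff, ← dvd_natAbs_iff, ← dvd_natAbs_iff]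
  norm_num

theorem spisok_2_eq_alt (x1 : Int) : spisok_2 x1 = spisok_2_alt x1 := by
  rw [spisok_2_alt, hits_eq x1 9367 (by norm_num), hits_eq x1 47027 (by norm_num)]
  simp only [decide_eq_decide.mpr (gcd_9367 x1), decide_eq_decide.mpr (gcd_47027 x1)]
  by_cases h17 : (17:Int) ∣ x1 <;> by_cases h19 : (19:Int) ∣ x1 <;>
    by_cases h29 : (29:Int) ∣ x1 <;> by_cases h31 : (31:Int) ∣ x1 <;>
    by_cases h37 : (37:Int) ∣ x1 <;> by_cases h41 : (41:Int) ∣ x1 <;>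
    simp [spisok_2, List.foldl, h17, h19, h29, h31, h37, h41]

-- ===== VERDICT (by name: the statement is the Claim_ definition above) =====
theorem spisok_2_spec : Claim_equal_spisok_2 := by
  intro x1 _
  exact spisok_2_eq_alt x1
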